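-- pv_equiv track=rewrite | github.com/Th3C0D3R/Wplace-AutoBotnet-Server | server/pixel_patterns.py | _line_right
-- ===== SOURCE A (Python) =====
-- from typing import Dict, List, Any, Tuple, Optional
-- from collections import defaultdict
--
-- def _line_right(changes: List[Dict[str, Any]]) -> List[Dict[str, Any]]:
--     """Ordenar píxeles por columnas de derecha a izquierda."""
--     cols: Dict[int, List[Dict[str, Any]]] = defaultdict(list)
--     for ch in changes:
--         cols[int(ch['x'])].append(ch)
--
--     out = []
--     for x in sorted(cols.keys(), reverse=True):
--         col = cols[x]
--         col.sort(key=lambda c: int(c['y']))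
--         out.extend(col)
--     return out
-- ===== SOURCE B (Python) =====
-- from typing import Dict, List, Any
--
-- def _line_right(changes: List[Dict[str, Any]]) -> List[Dict[str, Any]]:
--     """Ordenar píxeles por columnas de derecha a izquierda."""
--     return sorted(changes, key=lambda c: (-int(c['x']), int(c['y'])))
-- ===== Notes on version B (the rewrite author's own statement) =====
-- stated objective: simpler
-- what changed: Replaces the defaultdict grouping with per-column in-place sorts and multi-pass output assembly by a single stable sort of the whole list under the composite key (-x, y).
import Mathlib
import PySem

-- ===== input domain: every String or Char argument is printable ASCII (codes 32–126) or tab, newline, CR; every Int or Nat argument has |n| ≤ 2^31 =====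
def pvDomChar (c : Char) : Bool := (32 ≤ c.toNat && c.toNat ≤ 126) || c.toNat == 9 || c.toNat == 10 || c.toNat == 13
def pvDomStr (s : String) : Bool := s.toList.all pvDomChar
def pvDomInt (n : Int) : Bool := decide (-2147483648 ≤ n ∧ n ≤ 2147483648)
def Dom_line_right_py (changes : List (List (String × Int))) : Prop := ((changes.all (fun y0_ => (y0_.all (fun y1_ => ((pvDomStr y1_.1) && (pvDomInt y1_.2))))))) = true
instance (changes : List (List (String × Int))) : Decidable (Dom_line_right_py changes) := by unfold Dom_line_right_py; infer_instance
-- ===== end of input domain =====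

-- B replaces A's grouping-by-column + per-column sorts + multi-pass assembly by one
-- stable sort under the composite key (-x, y): simpler, same result.

-- ch[k] (first-match lookup); the .getD 0 default is unreachable under Pre_ (missing key = KeyError, excluded)
def pvGet (d : List (String × Int)) (k : String) : Int :=
  (((d.find? (fun p => p.1 == k)).map (fun p => p.2)).getD 0)

-- ===== PORT A =====
def line_right_py (changes : List (List (String × Int))) : List (List (String × Int)) :=
  let cols : PySem.Dict Int (List (List (String × Int))) :=
    changes.foldl (fun d ch => d.modify (pvGet ch "x") [] (fun col => col ++ [ch])) PySem.Dict.empty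
  (PySem.List.sorted cols.keys (fun x => x) true).foldl
    (fun out x => out ++ PySem.List.sorted (cols.getD x []) (fun c => pvGet c "y") false) []

-- ===== PORT B =====
def line_right_py_alt (changes : List (List (String × Int))) : List (List (String × Int)) :=
  PySem.List.sorted2 changes (fun c => -(pvGet c "x")) (fun c => pvGet c "y") false

-- ===== PRECONDITION & SPEC =====
-- Pre_: every change carries the keys "x" and "y" — exactly where Python's A returns (a missing key is a KeyError)
def Pre_line_right_py (changes : List (List (String × Int))) : Prop :=
  (changes.all (fun ch => ch.any (fun p => p.1 == "x") && ch.any (fun p => p.1 == "y"))) = true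
instance (changes : List (List (String × Int))) : Decidable (Pre_line_right_py changes) := by unfold Pre_line_right_py; infer_instance
def pvWitness_line_right_py : (List (List (String × Int))) :=
  [[("x", 2), ("y", 1)], [("x", 1), ("y", 0)], [("x", 2), ("y", 0)]]

def Spec_line_right_py (changes : List (List (String × Int))) (out : List (List (String × Int))) : Prop := out = line_right_py_alt changes
instance (changes : List (List (String × Int))) (out : List (List (String × Int))) : Decidable (Spec_line_right_py changes out) := by unfold Spec_line_right_py; infer_instance

-- ===== CLAIM (what is proved, stated in full; the proofs are below) =====
def Claim_equal_line_right_py : Prop := ∀ (changes : List (List (String × Int))), Dom_line_right_py changes → Pre_line_right_py changes → Spec_line_right_py changes (line_right_py changes)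

-- ===== LEMMAS AND PROOFS =====

-- the canonical form both ports are reduced to: columns in strictly descending x order,
-- each column the stable y-sort of that column's changes in input order
def pvCol (changes : List (List (String × Int))) (x : Int) : List (List (String × Int)) :=
  PySem.List.sorted (changes.filter (fun c => pvGet c "x" == x)) (fun c => pvGet c "y") false

def pvFlat (changes : List (List (String × Int))) : List (List (String × Int)) :=
  (PySem.List.sorted (PySem.Set.ofList (changes.map (fun c => pvGet c "x"))) (fun x => x) true).flatMap
    (pvCol changes)

-- B's composite-key "insert before" test
def pvLexB (a b : List (String × Int)) : Bool :=
  decide (-(pvGet a "x") < -(pvGet b "x")) ||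
    (!decide (-(pvGet b "x") < -(pvGet a "x")) && decide (pvGet a "y" < pvGet b "y"))

theorem insertBy_append_left {α : Type} (b : α → α → Bool) (x : α) (l r : List α)
    (h : ∀ a ∈ l, b x a = false) :
    PySem.List.insertBy b x (l ++ r) = l ++ PySem.List.insertBy b x r := by
  induction l with
  | nil => simp
  | cons y t ih =>
    simp only [List.cons_append, PySem.List.insertBy, h y (by simp)]
    simp only [Bool.false_eq_true, if_false]
    rw [ih (fun a ha => h a (by simp [ha]))]
theorem insertBy_all_before {α : Type} (b : α → α → Bool) (x : α) (l : List α)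
    (h : ∀ a ∈ l, b x a = true) :
    PySem.List.insertBy b x l = x :: l := by
  cases l with
  | nil => rfl
  | cons y t => simp [PySem.List.insertBy, h y (by simp)]
theorem insertBy_append_right {α : Type} (b : α → α → Bool) (x : α) (l r : List α)
    (h : ∀ a ∈ r, b x a = true) :
    PySem.List.insertBy b x (l ++ r) = PySem.List.insertBy b x l ++ r := by
  induction l with
  | nil => simp [insertBy_all_before b x r h, PySem.List.insertBy]
  | cons y t ih =>
    by_cases hb : b x y = true
    · simp [PySem.List.insertBy, hb]
    · simp only [List.cons_append, PySem.List.insertBy, hb]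
      simp only [Bool.false_eq_true, if_false] at *
      rw [ih]
      simp
theorem insertBy_congr {α : Type} (b1 b2 : α → α → Bool) (x : α) (l : List α)
    (h : ∀ a ∈ l, b1 x a = b2 x a) :
    PySem.List.insertBy b1 x l = PySem.List.insertBy b2 x l := by
  induction l with
  | nil => rfl
  | cons y t ih =>
    simp only [PySem.List.insertBy, h y (by simp)]
    rw [ih (fun a ha => h a (by simp [ha]))]

theorem desc_dropWhile_le (x0 : Int) :
    ∀ L : List Int, L.Pairwise (fun a b => b < a) →
      ∀ a ∈ L.dropWhile (fun a => decide (x0 < a)), a ≤ x0 := by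
  intro L
  induction L with
  | nil => simp
  | cons h t ih =>
    intro hp a ha
    rcases List.pairwise_cons.mp hp with ⟨hht, ht⟩
    by_cases hx : x0 < h
    · rw [List.dropWhile_cons_of_pos (by simpa using hx)] at ha
      exact ih ht a ha
    · rw [List.dropWhile_cons_of_neg (by simpa using hx)] at ha
      rcases List.mem_cons.mp ha with rfl | ha
      · omega
      · have := hht a ha; omega

theorem mem_col_x (ys : List (List (String × Int))) (x : Int) (a : List (String × Int))
    (ha : a ∈ pvCol ys x) : pvGet a "x" = x := by
  unfold pvCol at ha
  rw [PySem.List.mem_sorted] at ha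
  simpa using (List.mem_filter.mp ha).2

theorem flatMap_congr_mem {α β : Type} (l : List α) (f g : α → List β)
    (h : ∀ x ∈ l, f x = g x) : l.flatMap f = l.flatMap g := by
  induction l with
  | nil => rfl
  | cons y t ih => simp only [List.flatMap_cons, h y (by simp)]; rw [ih (fun x hx => h x (by simp [hx]))]

theorem flat_snoc (xs : List (List (String × Int))) (c : List (String × Int)) :
    pvFlat (xs ++ [c]) = PySem.List.insertBy pvLexB c (pvFlat xs) := by
  set x0 := pvGet c "x" with hx0def
  set gX : List (String × Int) → Int := fun ch => pvGet ch "x" with hgX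
  set S := PySem.Set.ofList (xs.map gX) with hS
  set L := PySem.List.sorted S (fun x => x) true with hL
  -- snoc of the key list
  have hmap : (xs ++ [c]).map gX = xs.map gX ++ [x0] := by
    simp only [List.map_append, List.map_cons, List.map_nil, hgX]
    rw [hx0def]
  -- L is strictly descending
  have hperm : L.Perm S := PySem.List.sorted_perm _ _ _
  have hnd : L.Nodup := (hperm.nodup_iff).mpr (PySem.Set.nodup_ofList _)
  have hge : L.Pairwise (fun a b : Int => b ≤ a) := PySem.List.sorted_pairwise_rev S (fun x => x)
  have hdesc : L.Pairwise (fun a b : Int => b < a) := by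
    have := hge.and hnd
    exact this.imp (fun h => lt_of_le_of_ne h.1 (Ne.symm h.2))
  obtain ⟨P, Q, hPQ, hPgt, hQle⟩ :
      ∃ P Q, L = P ++ Q ∧ (∀ a ∈ P, x0 < a) ∧ (∀ a ∈ Q, a ≤ x0) :=
    ⟨L.takeWhile (fun a => decide (x0 < a)), L.dropWhile (fun a => decide (x0 < a)),
      (List.takeWhile_append_dropWhile).symm,
      fun a ha => by simpa using List.mem_takeWhile_imp ha,
      desc_dropWhile_le x0 L hdesc⟩
  have hQpair : Q.Pairwise (fun a b : Int => b < a) := (List.pairwise_append.mp (hPQ ▸ hdesc)).2.1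
  -- lex comparisons
  have lex_false : ∀ a, x0 < pvGet a "x" → pvLexB c a = false := by
    intro a h; unfold pvLexB; rw [← hx0def]
    have h1 : ¬(-x0 < -(pvGet a "x")) := by omega
    have h2 : -(pvGet a "x") < -x0 := by omega
    simp [h1, h2]
  have lex_true : ∀ a, pvGet a "x" < x0 → pvLexB c a = true := by
    intro a h; unfold pvLexB; rw [← hx0def]
    have h1 : -x0 < -(pvGet a "x") := by omega
    simp [h1]
  have lex_eqx : ∀ a, pvGet a "x" = x0 → pvLexB c a = decide (pvGet c "y" < pvGet a "y") := by
    intro a h; unfold pvLexB; rw [← hx0def, h]; simp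
  -- flatMap blocks
  have hflatP_false : ∀ a ∈ P.flatMap (pvCol xs), pvLexB c a = false := by
    intro a ha
    rcases List.mem_flatMap.mp ha with ⟨x, hxP, hax⟩
    exact lex_false a (by rw [mem_col_x xs x a hax]; exact hPgt x hxP)
  -- columns of the extended list
  have hcol_ne : ∀ x : Int, x ≠ x0 → pvCol (xs ++ [c]) x = pvCol xs x := by
    intro x hx
    unfold pvCol
    rw [List.filter_append]
    have : ([c].filter (fun ch => pvGet ch "x" == x)) = [] := by
      simp only [List.filter_cons, List.filter_nil, ← hx0def]
      have : ¬(x0 == x) = true := by simpa using fun h => hx h.symm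
      simp [this]
    rw [this, List.append_nil]
  have hcol_eq : pvCol (xs ++ [c]) x0 =
      PySem.List.insertBy (fun a b => decide (pvGet a "y" < pvGet b "y")) c (pvCol xs x0) := by
    unfold pvCol
    rw [List.filter_append]
    have : ([c].filter (fun ch => pvGet ch "x" == x0)) = [c] := by simp [← hx0def]
    rw [this, PySem.List.sorted_eq_foldl_insertBy, PySem.List.sorted_eq_foldl_insertBy,
      List.foldl_append]
    rfl
  have hflat' : pvFlat (xs ++ [c]) =
      (PySem.List.sorted (PySem.Set.add S x0) (fun x => x) true).flatMap (pvCol (xs ++ [c])) := by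
    unfold pvFlat
    rw [hmap, PySem.Set.ofList_append_singleton]
  have hflat : pvFlat xs = P.flatMap (pvCol xs) ++ Q.flatMap (pvCol xs) := by
    unfold pvFlat
    rw [← hS, ← hL, hPQ, List.flatMap_append]
  by_cases hmem : x0 ∈ S
  · -- existing column
    have hadd : PySem.Set.add S x0 = S := PySem.Set.add_of_mem hmem
    have hx0L : x0 ∈ L := hperm.mem_iff.mpr hmem
    have hx0Q : x0 ∈ Q := by
      rcases List.mem_append.mp (hPQ ▸ hx0L) with h | h
      · exact absurd (hPgt x0 h) (lt_irrefl x0)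
      · exact h
    obtain ⟨q, Q', rfl⟩ : ∃ q Q', Q = q :: Q' := by
      cases Q with
      | nil => simp at hx0Q
      | cons q Q' => exact ⟨q, Q', rfl⟩
    have hq : q = x0 := by
      rcases List.mem_cons.mp hx0Q with h | h
      · exact h.symm
      · have h1 := (List.pairwise_cons.mp hQpair).1 x0 h
        have h2 := hQle q (by simp)
        omega
    subst hq
    have hQ'lt : ∀ a ∈ Q', a < x0 := (List.pairwise_cons.mp hQpair).1
    rw [hflat', hadd, ← hL, hPQ, List.flatMap_append, List.flatMap_cons]
    rw [flatMap_congr_mem P _ (pvCol xs) (fun x hx => hcol_ne x (by have := hPgt x hx; omega)),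
        flatMap_congr_mem Q' _ (pvCol xs) (fun x hx => hcol_ne x (by have := hQ'lt x hx; omega)),
        hcol_eq]
    rw [hflat, List.flatMap_cons]
    rw [insertBy_append_left pvLexB c _ _ hflatP_false]
    rw [insertBy_append_right pvLexB c _ _ (by
      intro a ha
      rcases List.mem_flatMap.mp ha with ⟨x, hxQ, hax⟩
      exact lex_true a (by rw [mem_col_x xs x a hax]; exact hQ'lt x hxQ))]
    rw [insertBy_congr pvLexB (fun a b => decide (pvGet a "y" < pvGet b "y")) c _ (by
      intro a ha
      exact lex_eqx a (mem_col_x xs x0 a ha))]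
  · -- new column
    have hadd : PySem.Set.add S x0 = S ++ [x0] := PySem.Set.add_of_not_mem hmem
    have hx0L : x0 ∉ L := fun h => hmem (hperm.mem_iff.mp h)
    have hQlt : ∀ a ∈ Q, a < x0 := by
      intro a ha
      have h1 := hQle a ha
      have h2 : a ≠ x0 := fun h => hx0L (h ▸ (hPQ ▸ List.mem_append_right P ha))
      omega
    have hL' : PySem.List.sorted (S ++ [x0]) (fun x : Int => x) true = P ++ x0 :: Q := by
      rw [PySem.List.sorted_rev_eq_foldl_insertBy, List.foldl_append,
        ← PySem.List.sorted_rev_eq_foldl_insertBy, ← hL]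
      show PySem.List.insertBy (fun a b => decide (b < a)) x0 L = P ++ x0 :: Q
      rw [hPQ, insertBy_append_left _ x0 P Q (fun a ha => by simp; have := hPgt a ha; omega),
        insertBy_all_before _ x0 Q (fun a ha => by simp; exact hQlt a ha)]
    have hcol0 : pvCol xs x0 = [] := by
      unfold pvCol
      have : xs.filter (fun ch => pvGet ch "x" == x0) = [] := by
        rw [List.filter_eq_nil_iff]
        intro a ha h
        exact hmem (by
          rw [hS, PySem.Set.mem_ofList]
          exact List.mem_map.mpr ⟨a, ha, by simpa using h⟩)
      rw [this]; rfl
    rw [hflat', hadd, hL', List.flatMap_append, List.flatMap_cons]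
    rw [flatMap_congr_mem P _ (pvCol xs) (fun x hx => hcol_ne x (by have := hPgt x hx; omega)),
        flatMap_congr_mem Q _ (pvCol xs) (fun x hx => hcol_ne x (by have := hQlt x hx; omega)),
        hcol_eq, hcol0]
    rw [hflat]
    rw [insertBy_append_left pvLexB c _ _ hflatP_false]
    rw [insertBy_all_before pvLexB c _ (by
      intro a ha
      rcases List.mem_flatMap.mp ha with ⟨x, hxQ, hax⟩
      exact lex_true a (by rw [mem_col_x xs x a hax]; exact hQlt x hxQ))]
    rfl

theorem cols_keys (changes : List (List (String × Int))) :
    (changes.foldl (fun d ch => d.modify (pvGet ch "x") [] (fun col => col ++ [ch]))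
      (PySem.Dict.empty : PySem.Dict Int (List (List (String × Int))))).keys
      = PySem.Set.ofList (changes.map (fun c => pvGet c "x")) := by
  rw [PySem.Dict.keys_foldl_modify_key changes (fun ch => pvGet ch "x") [] (fun _ ch col => col ++ [ch])]
  simp [PySem.Set.update_nil_left]

theorem cols_getD (changes : List (List (String × Int))) (x : Int) :
    (changes.foldl (fun d ch => d.modify (pvGet ch "x") [] (fun col => col ++ [ch]))
      (PySem.Dict.empty : PySem.Dict Int (List (List (String × Int))))).getD x []
      = changes.filter (fun c => pvGet c "x" == x) := by
  have h : changes.foldl (fun d ch => d.modify (pvGet ch "x") [] (fun col => col ++ [ch]))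
      (PySem.Dict.empty : PySem.Dict Int (List (List (String × Int))))
      = (changes.map (fun ch => (pvGet ch "x", ch))).foldl
          (fun d p => d.modify p.1 [] (fun col => col ++ [p.2])) PySem.Dict.empty := by
    rw [List.foldl_map]
  rw [h, PySem.Dict.getD_foldl_modify_append]
  simp [List.filter_map, Function.comp_def]

theorem a_eq_flat (changes : List (List (String × Int))) : line_right_py changes = pvFlat changes := by
  unfold line_right_py pvFlat
  simp only [cols_keys, cols_getD]
  rw [PySem.List.foldl_append_eq_flatMap]
  rfl

theorem alt_eq_foldl (changes : List (List (String × Int))) :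
    line_right_py_alt changes = changes.foldl (fun acc x => PySem.List.insertBy pvLexB x acc) [] := rfl

theorem b_eq_flat (changes : List (List (String × Int))) : line_right_py_alt changes = pvFlat changes := by
  induction changes using List.reverseRecOn with
  | nil => rfl
  | append_singleton xs c ih =>
    rw [alt_eq_foldl, List.foldl_append, ← alt_eq_foldl, ih, flat_snoc]
    rfl

-- ===== VERDICT (by name: the statement is the Claim_ definition above) =====
theorem line_right_py_spec : Claim_equal_line_right_py := by
  intro changes _ _
  unfold Spec_line_right_py
  rw [a_eq_flat, b_eq_flat]
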